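-- pv_equiv track=rewrite | github.com/puppe1990/metaphoric-chatbot | agent_service/app/agents.py | _latest_user_problem
-- ===== SOURCE A (Python) =====
-- def _latest_user_problem(user_input: str) -> str:
--     user_lines = [
--         line.split(":", 1)[1].strip()
--         for line in user_input.splitlines()
--         if line.lower().startswith("user:") and ":" in line
--     ]
--     if user_lines:
--         return user_lines[-1]
--     return user_input.strip()
-- ===== SOURCE B (Python) =====
-- def _latest_user_problem(user_input: str) -> str:
--     for line in reversed(user_input.splitlines()):
--         if line.lower().startswith("user:"):
--             return line.split(":", 1)[1].strip()
--     return user_input.strip()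
-- ===== Notes on version B (the rewrite author's own statement) =====
-- stated objective: simpler
-- what changed: Replaces the forward list-comprehension that accumulates all 'user:' lines and indexes the last with a reverse scan over splitlines() that returns the first match immediately, maintaining no intermediate list and dropping the redundant ':' in line check.
import Mathlib
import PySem

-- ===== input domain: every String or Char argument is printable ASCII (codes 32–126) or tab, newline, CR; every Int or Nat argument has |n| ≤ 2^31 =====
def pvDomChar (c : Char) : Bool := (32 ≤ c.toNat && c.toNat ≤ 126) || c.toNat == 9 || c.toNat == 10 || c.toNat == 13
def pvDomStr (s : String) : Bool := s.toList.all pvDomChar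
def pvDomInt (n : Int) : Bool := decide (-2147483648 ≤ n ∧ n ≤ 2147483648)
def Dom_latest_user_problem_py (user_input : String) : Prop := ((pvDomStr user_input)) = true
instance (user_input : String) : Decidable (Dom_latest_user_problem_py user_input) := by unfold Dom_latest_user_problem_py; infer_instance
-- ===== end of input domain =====

-- B changes the decomposition only (simpler, not faster): reverse scan with early return instead of accumulate-all-then-take-last.

-- ===== PORT A =====
-- line.split(":", 1)[1].strip(); the guard guarantees ':' ∈ line so index 1 exists — pyGetD's default is never used
def pvParseVal (line : String) : String :=
  PySem.Str.strip (PySem.List.pyGetD ((PySem.Str.splitMax? line ":" 1).getD []) 1 "")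

def latest_user_problem_py (user_input : String) : String :=
  let user_lines := (PySem.Str.splitlines user_input).filterMap (fun line =>
    if PySem.Str.startswith (PySem.Str.lower line) "user:" && PySem.Str.isIn ":" line then
      some (pvParseVal line)
    else none)
  if user_lines ≠ [] then PySem.List.pyGetD user_lines (-1) ""
  else PySem.Str.strip user_input

-- ===== PORT B =====
-- the for-loop of Source B over the reversed line list, returning at the first match
def pvFindUser : List String → Option String
  | [] => none
  | line :: rest =>
    if PySem.Str.startswith (PySem.Str.lower line) "user:" then
      some (pvParseVal line)
    else pvFindUser rest

def latest_user_problem_py_alt (user_input : String) : String :=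
  match pvFindUser (PySem.Str.splitlines user_input).reverse with
  | some r => r
  | none => PySem.Str.strip user_input

-- ===== PRECONDITION & SPEC =====
def Spec_latest_user_problem_py (user_input : String) (out : String) : Prop := out = latest_user_problem_py_alt user_input
instance (user_input : String) (out : String) : Decidable (Spec_latest_user_problem_py user_input out) := by unfold Spec_latest_user_problem_py; infer_instance

-- ===== CLAIM (what is proved, stated in full; the proofs are below) =====
def Claim_equal_latest_user_problem_py : Prop := ∀ (user_input : String), Dom_latest_user_problem_py user_input → Spec_latest_user_problem_py user_input (latest_user_problem_py user_input)

-- ===== LEMMAS AND PROOFS =====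

theorem lowerChar_eq_colon {c : Char} (h : PySem.Chars.lowerChar c = ':') : c = ':' := by
  unfold PySem.Chars.lowerChar PySem.Chars.isupper at h
  split_ifs at h with hu
  · exfalso
    simp only [Bool.and_eq_true, decide_eq_true_eq] at hu
    have h1 : 65 ≤ c.toNat := hu.1
    have h2 : c.toNat ≤ 90 := hu.2
    have hv : (c.toNat + 32).isValidChar := by left; omega
    have := congrArg Char.toNat h
    simp [Char.ofNat, hv] at this
    omega
  · exact h

-- the redundant guard of A: a line whose lowercase starts with "user:" contains ':'
theorem colon_of_startswith {line : String}
    (h : PySem.Str.startswith (PySem.Str.lower line) "user:" = true) :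
    PySem.Str.isIn ":" line = true := by
  rw [PySem.Str.isIn_iff_infix]
  unfold PySem.Str.startswith PySem.Str.lower at h
  unfold PySem.Chars.startswith at h
  rw [List.isPrefixOf_iff_prefix] at h
  have h' : "user:".toList <+: PySem.Chars.lower line.toList := by simpa using h
  obtain ⟨t, ht⟩ := h'
  unfold PySem.Chars.lower at ht
  have ht' : line.toList.map PySem.Chars.lowerChar = "user:".toList ++ t := ht.symm
  rw [List.map_eq_append_iff] at ht'
  obtain ⟨s₁, s₂, hsplit, hmap, -⟩ := ht'
  rcases s₁ with _ | ⟨c1, _ | ⟨c2, _ | ⟨c3, _ | ⟨c4, _ | ⟨c5, rest⟩⟩⟩⟩⟩ <;>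
    simp at hmap
  obtain ⟨e1, e2, e3, e4, e5, hrest⟩ := hmap
  have hc5 : c5 = ':' := lowerChar_eq_colon e5
  subst hc5 hrest
  rw [hsplit]
  exact ⟨[c1, c2, c3, c4], s₂, by simp⟩

theorem findUser_eq_getLast? (L : List String) :
    pvFindUser L.reverse =
      (L.filterMap (fun line =>
        if PySem.Str.startswith (PySem.Str.lower line) "user:" then
          some (pvParseVal line)
        else none)).getLast? := by
  induction L using List.reverseRecOn with
  | nil => simp [pvFindUser]
  | append_singleton L x ih =>
    rw [List.reverse_append]
    simp only [List.reverse_singleton, List.singleton_append, pvFindUser,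
      List.filterMap_append]
    by_cases hx : PySem.Str.startswith (PySem.Str.lower x) "user:" = true
    · simp at hx ⊢; simp [hx]
    · simp only [Bool.not_eq_true] at hx
      simp at hx ⊢; simp [hx, ih]

theorem latest_user_problem_py_spec : Claim_equal_latest_user_problem_py := by
  unfold Claim_equal_latest_user_problem_py Spec_latest_user_problem_py
  intro s _
  unfold latest_user_problem_py latest_user_problem_py_alt
  have hcong : (PySem.Str.splitlines s).filterMap (fun line =>
        if PySem.Str.startswith (PySem.Str.lower line) "user:" && PySem.Str.isIn ":" line then
          some (pvParseVal line)
        else none)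
      = (PySem.Str.splitlines s).filterMap (fun line =>
        if PySem.Str.startswith (PySem.Str.lower line) "user:" then
          some (pvParseVal line)
        else none) := by
    apply List.filterMap_congr
    intro line _
    by_cases h : PySem.Str.startswith (PySem.Str.lower line) "user:" = true
    · have h2 := colon_of_startswith h
      simp at h h2 ⊢; simp [h, h2]
    · simp only [Bool.not_eq_true] at h
      simp at h ⊢; simp [h]
  simp only [hcong, findUser_eq_getLast? (PySem.Str.splitlines s)]
  set us := (PySem.Str.splitlines s).filterMap (fun line =>
        if PySem.Str.startswith (PySem.Str.lower line) "user:" then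
          some (pvParseVal line)
        else none) with hus
  by_cases hne : us = []
  · simp [hne]
  · rw [if_pos hne, PySem.List.pyGetD_neg_one us "" hne,
      List.getLast?_eq_some_getLast hne]
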